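-- pv_equiv track=rewrite | github.com/stvadams-research/voynichMS | src/phase12_mechanical/jigsaw_solver.py | synthesize_blueprint
-- ===== SOURCE A (Python) =====
-- from typing import List, Dict, Any, Tuple
--
-- def synthesize_blueprint(columns: Dict[int, List[Tuple[str, int]]], max_rows: int = 10) -> List[List[str]]:
--     max_pos = max(columns.keys()) if columns else 0
--     blueprint = []
--
--     for r in range(max_rows):
--         row = []
--         for p in range(1, max_pos + 1):
--             stack = columns.get(p, [])
--             if r < len(stack):
--                 row.append(stack[r][0])
--             else:
--                 row.append("-")
--         blueprint.append(row)
--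
--     return blueprint
-- ===== SOURCE B (Python) =====
-- def synthesize_blueprint(columns, max_rows=10):
--     max_pos = max(columns) if columns else 0
--     grid = [["-"] * max_pos for _ in range(max_rows)]
--     for p, stack in columns.items():
--         if 1 <= p <= max_pos:
--             for r in range(min(len(stack), max_rows)):
--                 grid[r][p - 1] = stack[r][0]
--     return grid
-- ===== Notes on version B (the rewrite author's own statement) =====
-- stated objective: alternative
-- what changed: B pre-fills a dense '-' grid and scatters only the populated cells by iterating over the column stacks, instead of A's per-cell dict lookup over every (row, position) pair.
import Mathlib
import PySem

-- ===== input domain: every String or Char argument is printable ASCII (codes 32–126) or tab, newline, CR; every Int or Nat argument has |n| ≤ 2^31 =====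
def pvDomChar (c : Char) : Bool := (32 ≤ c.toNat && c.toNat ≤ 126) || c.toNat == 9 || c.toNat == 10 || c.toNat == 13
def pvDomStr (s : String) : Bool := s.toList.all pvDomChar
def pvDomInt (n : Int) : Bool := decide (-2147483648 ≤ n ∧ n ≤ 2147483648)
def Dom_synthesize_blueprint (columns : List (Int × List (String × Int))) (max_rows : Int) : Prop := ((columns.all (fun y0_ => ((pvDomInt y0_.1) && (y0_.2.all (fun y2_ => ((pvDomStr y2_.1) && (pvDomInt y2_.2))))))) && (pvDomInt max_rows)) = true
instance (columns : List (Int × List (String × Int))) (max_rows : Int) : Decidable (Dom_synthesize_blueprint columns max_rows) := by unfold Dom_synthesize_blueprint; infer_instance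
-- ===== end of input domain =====

-- B pre-fills a dense '-' grid and scatters the populated column stacks instead of A's per-cell dict lookup (alternative decomposition, same cost class).


-- ===== PORT A =====
-- columns.get(p, []) : first-match association-list lookup (the list stands for a Python dict)
def pyDictGet (columns : List (Int × List (String × Int))) (p : Int) : List (String × Int) :=
  match columns.find? (fun e => e.1 == p) with
  | some e => e.2
  | none => []

def synthesize_blueprint (columns : List (Int × List (String × Int))) (max_rows : Int) : List (List String) :=
  let max_pos : Int :=
    if columns.isEmpty then 0
    else match PySem.List.max? (columns.map (·.1)) (fun x => x) with
         | some m => m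
         | none => 0
  (PySem.List.pyRange 0 max_rows 1).foldl (fun blueprint r =>
    blueprint ++ [(PySem.List.pyRange 1 (max_pos + 1) 1).foldl (fun row p =>
      let stack := pyDictGet columns p
      if r < (stack.length : Int) then row ++ [(PySem.List.pyGetD stack r ("-", 0)).1]
      else row ++ ["-"]) []]) []

-- ===== PORT B =====
def synthesize_blueprint_alt (columns : List (Int × List (String × Int))) (max_rows : Int) : List (List String) :=
  let max_pos : Int :=
    if columns.isEmpty then 0
    else match PySem.List.max? (columns.map (·.1)) (fun x => x) with
         | some m => m
         | none => 0
  let grid : List (List String) := List.replicate max_rows.toNat (List.replicate max_pos.toNat "-")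
  columns.foldl (fun g e =>
    if 1 ≤ e.1 ∧ e.1 ≤ max_pos then
      (List.range (min e.2.length max_rows.toNat)).foldl (fun g r =>
        g.set r ((g.getD r []).set (e.1 - 1).toNat (e.2.getD r ("-", 0)).1)) g
    else g) grid

-- ===== PRECONDITION & SPEC =====
-- Pre_ excludes association lists with duplicate keys: no Python dict ever has them, and the
-- insertion-order association-list encoding leaves their meaning (first vs last match) accidental.
def Pre_synthesize_blueprint (columns : List (Int × List (String × Int))) (max_rows : Int) : Prop :=
  (columns.map (·.1)).Nodup
instance (columns : List (Int × List (String × Int))) (max_rows : Int) : Decidable (Pre_synthesize_blueprint columns max_rows) := by unfold Pre_synthesize_blueprint; infer_instance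
def pvWitness_synthesize_blueprint : (List (Int × List (String × Int))) × Int := ([(1, [("a", 0)]), (2, [])], 2)

def Spec_synthesize_blueprint (columns : List (Int × List (String × Int))) (max_rows : Int) (out : List (List String)) : Prop := out = synthesize_blueprint_alt columns max_rows
instance (columns : List (Int × List (String × Int))) (max_rows : Int) (out : List (List String)) : Decidable (Spec_synthesize_blueprint columns max_rows out) := by unfold Spec_synthesize_blueprint; infer_instance

-- ===== CLAIM (what is proved, stated in full; the proofs are below) =====
def Claim_equal_synthesize_blueprint : Prop := ∀ (columns : List (Int × List (String × Int))) (max_rows : Int), Dom_synthesize_blueprint columns max_rows → Pre_synthesize_blueprint columns max_rows → Spec_synthesize_blueprint columns max_rows (synthesize_blueprint columns max_rows)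

-- ===== LEMMAS AND PROOFS =====

-- the value both programs place at cell (r, j) (0-based), reading the association list first-match
def cellOf (cs : List (Int × List (String × Int))) (r j : Nat) : String :=
  match cs.find? (fun e => e.1 == (1 + (j : Int))) with
  | some e => if r < e.2.length then (e.2.getD r ("-", 0)).1 else "-"
  | none => "-"

def gridOf (cs : List (Int × List (String × Int))) (M P : Nat) : List (List String) :=
  (List.range M).map (fun r => (List.range P).map (fun j => cellOf cs r j))

lemma foldl_append_ite_singleton {α β : Type} (l : List β) (c : β → Prop) [DecidablePred c]
    (f g : β → α) (acc : List α) :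
    l.foldl (fun row p => if c p then row ++ [f p] else row ++ [g p]) acc
      = acc ++ l.map (fun p => if c p then f p else g p) := by
  induction l generalizing acc with
  | nil => simp
  | cons h t ih => rw [List.foldl_cons, List.map_cons, ih]; split_ifs <;> simp

lemma a_body_eq (columns : List (Int × List (String × Int))) (max_rows max_pos : Int) :
    (PySem.List.pyRange 0 max_rows 1).foldl (fun blueprint r =>
      blueprint ++ [(PySem.List.pyRange 1 (max_pos + 1) 1).foldl (fun row p =>
        let stack := pyDictGet columns p
        if r < (stack.length : Int) then row ++ [(PySem.List.pyGetD stack r ("-", 0)).1]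
        else row ++ ["-"]) []]) []
    = gridOf columns max_rows.toNat max_pos.toNat := by
  rw [PySem.List.foldl_append_singleton_eq_map, PySem.List.pyRange_one 0 max_rows, PySem.List.pyRange_one 1 (max_pos+1)]
  unfold gridOf
  simp only [Int.sub_zero, List.map_map, List.nil_append]
  apply List.map_congr_left
  intro k hk
  simp only [Function.comp_apply]
  rw [foldl_append_ite_singleton (c := fun p => ((0:Int) + (k:Int)) < ((pyDictGet columns p).length : Int))
      (f := fun p => (PySem.List.pyGetD (pyDictGet columns p) (0 + (k:Int)) ("-", 0)).1) (g := fun _ => "-")]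
  simp only [add_sub_cancel_right, List.map_map, List.nil_append]
  apply List.map_congr_left
  intro j hj
  simp only [Function.comp_apply, cellOf, pyDictGet]
  rcases hfind : columns.find? (fun e => e.1 == (1 + (j : Int))) with _ | e
  · rw [hfind]
    simp
  · rw [hfind]
    have : ((0:Int) + (k:Int) < (e.2.length : Int)) ↔ k < e.2.length := by omega
    rw [if_congr this rfl rfl]
    split_ifs with h
    · rw [show (0:Int) + (k:Int) = ((k:Nat) : Int) by omega, PySem.List.pyGetD_natCast]
      simp [h]
    · simp [h]

lemma set_map_range {α : Type} (h : Nat → α) (M k : Nat) (v : α) :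
    ((List.range M).map h).set k v
      = (List.range M).map (fun r => if r = k then v else h r) := by
  apply List.ext_getElem
  · simp
  · intro i h1 h2
    simp only [List.getElem_set, List.getElem_map, List.getElem_range] at *
    split_ifs with hik hik' hik'
    · rfl
    · omega
    · omega
    · rfl

lemma getD_map_range {α : Type} (h : Nat → α) (M k : Nat) (hk : k < M) (d : α) :
    ((List.range M).map h).getD k d = h k := by
  rw [List.getD_eq_getElem?_getD]
  simp [hk]

-- find? over cs ++ [(p,s)] at a key different from p
lemma cellOf_append_ne (cs : List (Int × List (String × Int))) (p : Int) (s : List (String × Int))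
    (r j : Nat) (hne : (1 + (j : Int)) ≠ p) :
    cellOf (cs ++ [(p, s)]) r j = cellOf cs r j := by
  unfold cellOf
  rw [List.find?_append]
  have : List.find? (fun e => e.1 == (1 + (j : Int))) [(p, s)] = none := by
    have : (p == (1 + (j : Int))) = false := by
      simp only [beq_eq_false_iff_ne]
      exact fun h => hne h.symm
    simp [List.find?, this]
  rw [this]
  cases cs.find? (fun e => e.1 == (1 + (j : Int))) <;> rfl

lemma cellOf_append_self (cs : List (Int × List (String × Int))) (p : Int) (s : List (String × Int))
    (r j : Nat) (heq : (1 + (j : Int)) = p) (hp : p ∉ cs.map (·.1)) :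
    cellOf (cs ++ [(p, s)]) r j
      = if r < s.length then (s.getD r ("-", 0)).1 else "-" := by
  unfold cellOf
  rw [List.find?_append]
  have h1 : cs.find? (fun e => e.1 == (1 + (j : Int))) = none := by
    rw [List.find?_eq_none]
    intro e he
    simp only [beq_iff_eq]
    intro h
    exact hp (by rw [← heq, ← h]; exact List.mem_map_of_mem he)
  have h2 : List.find? (fun e => e.1 == (1 + (j : Int))) [(p, s)] = some (p, s) := by
    simp [List.find?, heq]
  rw [h1, h2]
  rfl

lemma cellOf_not_mem (cs : List (Int × List (String × Int))) (r j : Nat)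
    (hp : (1 + (j : Int)) ∉ cs.map (·.1)) : cellOf cs r j = "-" := by
  unfold cellOf
  have h1 : cs.find? (fun e => e.1 == (1 + (j : Int))) = none := by
    rw [List.find?_eq_none]
    intro e he
    simp only [beq_iff_eq]
    exact fun h => hp (h ▸ List.mem_map_of_mem he)
  rw [h1]

lemma inner_scatter (cs : List (Int × List (String × Int))) (p : Int) (s : List (String × Int))
    (M P : Nat) (hp : p ∉ cs.map (·.1)) (h1 : 1 ≤ p) (h2 : (p.toNat - 1) < P)
    (k : Nat) (hk : k ≤ min s.length M) :
    (List.range k).foldl (fun g r =>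
        g.set r ((g.getD r []).set (p - 1).toNat (s.getD r ("-", 0)).1))
      (gridOf cs M P)
    = (List.range M).map (fun r =>
        if r < k then (List.range P).map (fun j => cellOf (cs ++ [(p, s)]) r j)
        else (List.range P).map (fun j => cellOf cs r j)) := by
  have hc : (p - 1).toNat = p.toNat - 1 := by omega
  have hceq : (1 + ((p.toNat - 1 : Nat) : Int)) = p := by omega
  induction k with
  | zero =>
    simp only [List.range_zero, List.foldl_nil, gridOf]
    apply List.map_congr_left
    intro r _
    simp
  | succ k ih =>
    have hk' : k ≤ min s.length M := by omega
    have hkM : k < M := by omega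
    have hks : k < s.length := by omega
    rw [List.range_succ, List.foldl_append, ih hk', List.foldl_cons, List.foldl_nil]
    rw [getD_map_range _ _ _ hkM]
    rw [if_neg (lt_irrefl k), hc]
    rw [set_map_range, set_map_range]
    apply List.map_congr_left
    intro r hr
    simp only [List.mem_range] at hr
    by_cases hrk : r = k
    · subst hrk
      rw [if_pos rfl, if_pos (Nat.lt_succ_self r)]
      apply List.map_congr_left
      intro j hj
      simp only [List.mem_range] at hj
      by_cases hjc : j = p.toNat - 1
      · subst hjc
        rw [if_pos rfl, cellOf_append_self cs p s r _ hceq hp, if_pos hks]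
      · rw [if_neg hjc, cellOf_append_ne cs p s r j (by omega)]
    · rw [if_neg hrk]
      by_cases hlt : r < k
      · rw [if_pos hlt, if_pos (by omega)]
      · rw [if_neg hlt, if_neg (by omega)]

lemma scatter_step (cs : List (Int × List (String × Int))) (p : Int) (s : List (String × Int))
    (max_rows max_pos : Int) (hp : p ∉ cs.map (·.1)) (hmax : p ≤ max_pos) :
    (if 1 ≤ p ∧ p ≤ max_pos then
      (List.range (min s.length max_rows.toNat)).foldl (fun g r =>
        g.set r ((g.getD r []).set (p - 1).toNat (s.getD r ("-", 0)).1))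
        (gridOf cs max_rows.toNat max_pos.toNat)
     else gridOf cs max_rows.toNat max_pos.toNat)
    = gridOf (cs ++ [(p, s)]) max_rows.toNat max_pos.toNat := by
  by_cases hg : 1 ≤ p ∧ p ≤ max_pos
  · rw [if_pos hg]
    have h2 : (p.toNat - 1) < max_pos.toNat := by omega
    rw [inner_scatter cs p s max_rows.toNat max_pos.toNat hp hg.1 h2 _ (le_refl _)]
    unfold gridOf
    apply List.map_congr_left
    intro r hr
    simp only [List.mem_range] at hr
    by_cases hlt : r < min s.length max_rows.toNat
    · rw [if_pos hlt]
    · rw [if_neg hlt]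
      apply List.map_congr_left
      intro j hj
      simp only [List.mem_range] at hj
      by_cases hjc : (1 + (j : Int)) = p
      · rw [cellOf_append_self cs p s r j hjc hp, cellOf_not_mem cs r j (hjc ▸ hp),
            if_neg (by omega)]
      · rw [cellOf_append_ne cs p s r j hjc]
  · rw [if_neg hg]
    unfold gridOf
    apply List.map_congr_left
    intro r _
    apply List.map_congr_left
    intro j hj
    simp only [List.mem_range] at hj
    exact (cellOf_append_ne cs p s r j (by omega)).symm

lemma grid_b_eq (columns : List (Int × List (String × Int))) (max_rows max_pos : Int)
    (hnd : (columns.map (·.1)).Nodup) (hle : ∀ q ∈ columns.map (·.1), q ≤ max_pos) :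
    columns.foldl (fun g e =>
      if 1 ≤ e.1 ∧ e.1 ≤ max_pos then
        (List.range (min e.2.length max_rows.toNat)).foldl (fun g r =>
          g.set r ((g.getD r []).set (e.1 - 1).toNat (e.2.getD r ("-", 0)).1)) g
      else g) (List.replicate max_rows.toNat (List.replicate max_pos.toNat "-"))
    = gridOf columns max_rows.toNat max_pos.toNat := by
  induction columns using List.reverseRecOn with
  | nil =>
    simp only [List.foldl_nil, gridOf, cellOf, List.find?_nil]
    rw [List.map_const', List.length_range]
    apply congrArg
    rw [List.map_const', List.length_range]
  | append_singleton cs e ih =>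
    obtain ⟨p, s⟩ := e
    simp only [List.map_append, List.map_cons, List.map_nil] at hnd hle
    have hnd' : (cs.map (·.1)).Nodup := (List.nodup_append.mp hnd).1
    have hp : p ∉ cs.map (·.1) := by
      intro hmem
      exact (List.nodup_append.mp hnd).2.2 p hmem p (List.mem_singleton_self p) rfl
    have hle' : ∀ q ∈ cs.map (·.1), q ≤ max_pos := fun q hq => hle q (List.mem_append_left _ hq)
    have hpm : p ≤ max_pos := hle p (List.mem_append_right _ (List.mem_singleton_self p))
    rw [List.foldl_append, List.foldl_cons, List.foldl_nil, ih hnd' hle']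
    exact scatter_step cs p s max_rows max_pos hp hpm

-- ===== VERDICT (by name: the statement is the Claim_ definition above) =====
theorem synthesize_blueprint_spec : Claim_equal_synthesize_blueprint := by
  intro columns max_rows _ hpre
  unfold Spec_synthesize_blueprint synthesize_blueprint synthesize_blueprint_alt Pre_synthesize_blueprint at *
  generalize hE : (if columns.isEmpty then (0:Int)
    else match PySem.List.max? (columns.map (·.1)) (fun x => x) with
         | some m => m
         | none => 0) = mp
  have hle : ∀ q ∈ columns.map (·.1), q ≤ mp := by
    intro q hq
    by_cases hemp : columns.isEmpty
    · rw [List.isEmpty_iff.mp hemp] at hq; simp at hq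
    · rw [if_neg hemp] at hE
      cases hmax : PySem.List.max? (columns.map (·.1)) (fun x => x) with
      | none =>
        rw [PySem.List.max?_eq_none_iff] at hmax
        rw [hmax] at hq; simp at hq
      | some m =>
        rw [hmax] at hE
        exact hE ▸ PySem.List.max?_isMax hmax q hq
  rw [a_body_eq columns max_rows mp, grid_b_eq columns max_rows mp hpre hle]
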